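-- pv_equiv track=rewrite | github.com/MarcdeFalco/advent-of-code-2021 | day18/s.py | add_left
-- ===== SOURCE A (Python) =====
-- def add_left(s, a):
--     i = len(s)-1
--     l = ''
--     while i >= 0:
--         c = s[i]
--         if c.isdigit():
--             n = c
--             while i > 0 and s[i-1].isdigit():
--                 i -= 1
--                 n = s[i] + n
--             return s[:i] + str(int(n)+a) + l
--         else:
--             l = c + l
--         i -= 1
--     return s
-- ===== SOURCE B (Python) =====
-- def add_left(s, a):
--     # single left-to-right pass recording the last maximal digit run, then rebuild with slices
--     run_start = None
--     best = None
--     for i, c in enumerate(s):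
--         if c.isdigit():
--             if run_start is None:
--                 run_start = i
--             best = (run_start, i + 1)
--         else:
--             run_start = None
--     if best is None:
--         return s
--     st, en = best
--     return s[:st] + str(int(s[st:en]) + a) + s[en:]
-- ===== Notes on version B (the rewrite author's own statement) =====
-- stated objective: faster
-- what changed: Replaces A's right-to-left index scan with character-by-character string prepending (quadratic) by a single left-to-right pass that records the (start,end) of the last maximal digit run and rebuilds the result with three slices.
import Mathlib
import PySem

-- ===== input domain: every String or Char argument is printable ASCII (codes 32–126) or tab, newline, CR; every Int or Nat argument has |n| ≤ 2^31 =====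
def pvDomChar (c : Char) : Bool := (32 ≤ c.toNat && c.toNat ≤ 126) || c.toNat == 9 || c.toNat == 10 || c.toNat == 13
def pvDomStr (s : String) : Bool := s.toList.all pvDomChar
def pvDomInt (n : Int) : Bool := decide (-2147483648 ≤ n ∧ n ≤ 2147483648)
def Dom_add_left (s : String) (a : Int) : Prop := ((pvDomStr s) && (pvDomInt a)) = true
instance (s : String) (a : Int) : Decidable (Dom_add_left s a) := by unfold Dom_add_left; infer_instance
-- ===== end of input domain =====

-- B replaces A's right-to-left scan with early return by a single left-to-right
-- pass recording the last maximal digit run, rebuilding with three slices (measured faster: avoids A's quadratic char-by-char prepending).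

-- ===== PORT A =====
-- A walks the string right to left (here: front to back over the reversed char list),
-- accumulating the already-seen suffix in `l`; on the first digit it extends the run
-- leftwards (the inner while loop) and returns s[:i] ++ str(int(n)+a) ++ l.
def pvInnerA : List Char → List Char → List Char × List Char
  | [], n => ([], n)
  | c :: rest, n =>
    if PySem.Chars.isdigit c then pvInnerA rest (c :: n) else (c :: rest, n)

def pvOuterA (cs : List Char) (a : Int) : List Char → List Char → List Char
  | [], _l => cs
  | c :: rest, l =>
    if PySem.Chars.isdigit c then
      let p := pvInnerA rest [c]
      p.1.reverse ++ PySem.Int.toChars ((PySem.Int.ofChars? p.2).getD 0 + a) ++ l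
    else pvOuterA cs a rest (c :: l)

def add_left (s : String) (a : Int) : String :=
  String.ofList (pvOuterA s.toList a s.toList.reverse [])

-- ===== PORT B =====
-- one left-to-right pass over (index, char) pairs, state = (run_start, best)
def pvScanB : List Char → Nat → Option Nat → Option (Nat × Nat) → Option (Nat × Nat)
  | [], _i, _run, best => best
  | c :: rest, i, run, best =>
    if PySem.Chars.isdigit c then
      let rs := run.getD i
      pvScanB rest (i + 1) (some rs) (some (rs, i + 1))
    else pvScanB rest (i + 1) none best

def add_left_alt (s : String) (a : Int) : String :=
  match pvScanB s.toList 0 none none with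
  | none => s
  | some (st, en) =>
    String.ofList (s.toList.take st
      ++ PySem.Int.toChars ((PySem.Int.ofChars? ((s.toList.drop st).take (en - st))).getD 0 + a)
      ++ s.toList.drop en)

-- ===== PRECONDITION & SPEC =====
def Spec_add_left (s : String) (a : Int) (out : String) : Prop := out = add_left_alt s a
instance (s : String) (a : Int) (out : String) : Decidable (Spec_add_left s a out) := by unfold Spec_add_left; infer_instance

-- ===== CLAIM (what is proved, stated in full; the proofs are below) =====
def Claim_equal_add_left : Prop := ∀ (s : String) (a : Int), Dom_add_left s a → Spec_add_left s a (add_left s a)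

-- ===== LEMMAS AND PROOFS =====

lemma pvInnerA_spec (r n : List Char) :
    pvInnerA r n = (r.dropWhile PySem.Chars.isdigit,
      (r.takeWhile PySem.Chars.isdigit).reverse ++ n) := by
  induction r generalizing n with
  | nil => simp [pvInnerA]
  | cons c rest ih =>
    by_cases h : PySem.Chars.isdigit c
    · simp [pvInnerA, h, ih]
    · simp [pvInnerA, h]

-- normal form of A's outer loop (proof helper)
def pvNfA (cs : List Char) (a : Int) (r l : List Char) : List Char :=
  match r.dropWhile (fun c => !PySem.Chars.isdigit c) with
  | [] => cs
  | c :: rest =>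
      (rest.dropWhile PySem.Chars.isdigit).reverse
        ++ PySem.Int.toChars
            ((PySem.Int.ofChars? ((rest.takeWhile PySem.Chars.isdigit).reverse ++ [c])).getD 0 + a)
        ++ ((r.takeWhile (fun c => !PySem.Chars.isdigit c)).reverse ++ l)

lemma pvOuterA_eq_nf (cs : List Char) (a : Int) :
    ∀ r l, pvOuterA cs a r l = pvNfA cs a r l := by
  intro r
  induction r with
  | nil => intro l; simp [pvOuterA, pvNfA]
  | cons c rest ih =>
    intro l
    by_cases h : PySem.Chars.isdigit c
    · simp [pvOuterA, h, pvNfA, pvInnerA_spec]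
    · simp [pvOuterA, h, ih, pvNfA]

lemma pvScanB_nodigit (V : List Char) (hV : ∀ c ∈ V, PySem.Chars.isdigit c = false) :
    ∀ i r b, pvScanB V i r b = b := by
  induction V with
  | nil => intro i r b; rfl
  | cons c rest ih =>
    intro i r b
    have hc := hV c (by simp)
    simp [pvScanB, hc]
    exact ih (fun x hx => hV x (by simp [hx])) _ _ _

lemma pvScanB_run (D : List Char) (hD : ∀ c ∈ D, PySem.Chars.isdigit c = true) :
    ∀ X i rs, pvScanB (D ++ X) i (some rs) (some (rs, i))
      = pvScanB X (i + D.length) (some rs) (some (rs, i + D.length)) := by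
  induction D with
  | nil => intro X i rs; simp
  | cons c rest ih =>
    intro X i rs
    have hc := hD c (by simp)
    simp only [List.cons_append, pvScanB, hc, if_true, Option.getD_some, List.length_cons]
    have h1 : i + (rest.length + 1) = i + 1 + rest.length := by omega
    rw [h1]
    exact ih (fun x hx => hD x (by simp [hx])) X (i + 1) rs

-- state-passing version of pvScanB (proof helper)
def pvScanS : List Char → Nat → Option Nat → Option (Nat × Nat) → Option Nat × Option (Nat × Nat)
  | [], _i, run, best => (run, best)
  | c :: rest, i, run, best =>
    if PySem.Chars.isdigit c then
      let rs := run.getD i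
      pvScanS rest (i + 1) (some rs) (some (rs, i + 1))
    else pvScanS rest (i + 1) none best

lemma pvScanB_append (U : List Char) :
    ∀ X i r b, pvScanB (U ++ X) i r b
      = pvScanB X (i + U.length) (pvScanS U i r b).1 (pvScanS U i r b).2 := by
  induction U with
  | nil => intro X i r b; simp [pvScanS]
  | cons c rest ih =>
    intro X i r b
    have h1 : i + (rest.length + 1) = i + 1 + rest.length := by omega
    by_cases h : PySem.Chars.isdigit c
    · simp only [List.cons_append, pvScanB, pvScanS, h, if_true, List.length_cons]
      rw [h1]
      exact ih X (i + 1) _ _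
    · simp only [List.cons_append, pvScanB, pvScanS, h, Bool.false_eq_true, if_false,
        List.length_cons]
      rw [h1]
      exact ih X (i + 1) _ _

lemma pvScanS_last_nondigit (U : List Char) (c : Char)
    (hc : PySem.Chars.isdigit c = false) :
    ∀ i r b, (pvScanS (U ++ [c]) i r b).1 = none := by
  induction U with
  | nil => intro i r b; simp [pvScanS, hc]
  | cons e rest ih =>
    intro i r b
    by_cases h : PySem.Chars.isdigit e
    · simp only [List.cons_append, pvScanS, h, if_true]; exact ih _ _ _
    · simp only [List.cons_append, pvScanS, h, Bool.false_eq_true, if_false]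
      exact ih _ _ _

lemma pvHead_dropWhile_false {p : Char → Bool} :
    ∀ (l : List Char) (x : Char) (xs : List Char), l.dropWhile p = x :: xs → p x = false := by
  intro l
  induction l with
  | nil => intro x xs h; simp [List.dropWhile] at h
  | cons c rest ih =>
    intro x xs h
    by_cases hc : p c
    · rw [List.dropWhile_cons_of_pos hc] at h; exact ih _ _ h
    · rw [List.dropWhile_cons_of_neg hc] at h
      cases h; simpa using hc

-- B's scan on cs = U ++ D ++ V, U empty or ending in a non-digit, D nonempty digits, V digit-free
lemma pvScanB_main (U D V : List Char)
    (hU : U = [] ∨ ∃ U' e, PySem.Chars.isdigit e = false ∧ U = U' ++ [e])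
    (hD : ∀ c ∈ D, PySem.Chars.isdigit c = true) (hDne : D ≠ [])
    (hV : ∀ c ∈ V, PySem.Chars.isdigit c = false) :
    pvScanB (U ++ D ++ V) 0 none none = some (U.length, U.length + D.length) := by
  rw [List.append_assoc, pvScanB_append]
  have hfst : (pvScanS U 0 none none).1 = none := by
    rcases hU with rfl | ⟨U', e, he, rfl⟩
    · rfl
    · exact pvScanS_last_nondigit U' e he _ _ _
  rw [hfst]
  cases D with
  | nil => exact absurd rfl hDne
  | cons e D₂ =>
    have he := hD e (by simp)
    simp only [List.cons_append, pvScanB, he, if_true, Option.getD_none, Nat.zero_add]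
    rw [pvScanB_run D₂ (fun x hx => hD x (by simp [hx])) V (U.length + 1) U.length]
    rw [pvScanB_nodigit V hV]
    simp only [List.length_cons]
    have h1 : U.length + 1 + D₂.length = U.length + (D₂.length + 1) := by omega
    rw [h1]

lemma pvAlt_nodigit (s : String) (a : Int)
    (h : ∀ c ∈ s.toList, PySem.Chars.isdigit c = false) : add_left_alt s a = s := by
  unfold add_left_alt
  rw [pvScanB_nodigit s.toList h]

lemma pvAlt_closed (s : String) (a : Int) (U D V : List Char)
    (hcs : s.toList = U ++ D ++ V)
    (hU : U = [] ∨ ∃ U' e, PySem.Chars.isdigit e = false ∧ U = U' ++ [e])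
    (hD : ∀ c ∈ D, PySem.Chars.isdigit c = true) (hDne : D ≠ [])
    (hV : ∀ c ∈ V, PySem.Chars.isdigit c = false) :
    add_left_alt s a
      = String.ofList (U ++ PySem.Int.toChars ((PySem.Int.ofChars? D).getD 0 + a) ++ V) := by
  unfold add_left_alt
  rw [hcs, pvScanB_main U D V hU hD hDne hV]
  have htake : (U ++ D ++ V).take U.length = U := by
    rw [List.append_assoc]; exact List.take_left' rfl
  have hdrop : (U ++ D ++ V).drop U.length = D ++ V := by
    rw [List.append_assoc]; exact List.drop_left' rfl
  have hlen : U.length + D.length - U.length = D.length := by omega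
  have htake2 : (D ++ V).take D.length = D := List.take_left' rfl
  have hdrop2 : (U ++ D ++ V).drop (U.length + D.length) = V := by
    have : U.length + D.length = (U ++ D).length := by simp
    rw [this]; exact List.drop_left
  simp only [htake, hdrop, hlen, htake2, hdrop2]

-- ===== VERDICT (by name: the statement is the Claim_ definition above) =====
theorem add_left_spec : Claim_equal_add_left := by
  intro s a _hdom
  unfold Spec_add_left add_left
  rw [pvOuterA_eq_nf]
  unfold pvNfA
  cases hsplit : s.toList.reverse.dropWhile (fun c => !PySem.Chars.isdigit c) with
  | nil =>
    have hall : ∀ c ∈ s.toList, PySem.Chars.isdigit c = false := by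
      intro c hc
      have h := List.dropWhile_eq_nil_iff.mp hsplit c (by simpa using hc)
      simpa using h
    rw [pvAlt_nodigit s a hall]
    exact String.ofList_toList
  | cons c rest =>
    have hcdig : PySem.Chars.isdigit c = true := by
      have := pvHead_dropWhile_false (p := fun c => !PySem.Chars.isdigit c)
        s.toList.reverse c rest hsplit
      simpa using this
    have h1 : (s.toList.reverse.takeWhile (fun c => !PySem.Chars.isdigit c)) ++ (c :: rest)
        = s.toList.reverse := by
      rw [← hsplit]; exact List.takeWhile_append_dropWhile
    have h2 : rest.takeWhile PySem.Chars.isdigit ++ rest.dropWhile PySem.Chars.isdigit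
        = rest := List.takeWhile_append_dropWhile
    have hcs : s.toList = (rest.dropWhile PySem.Chars.isdigit).reverse
        ++ ((rest.takeWhile PySem.Chars.isdigit).reverse ++ [c])
        ++ (s.toList.reverse.takeWhile (fun c => !PySem.Chars.isdigit c)).reverse := by
      calc s.toList = (s.toList.reverse).reverse := by simp
        _ = ((s.toList.reverse.takeWhile (fun c => !PySem.Chars.isdigit c))
              ++ (c :: rest)).reverse := by rw [h1]
        _ = ((s.toList.reverse.takeWhile (fun c => !PySem.Chars.isdigit c))
              ++ (c :: (rest.takeWhile PySem.Chars.isdigit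
                        ++ rest.dropWhile PySem.Chars.isdigit))).reverse := by rw [h2]
        _ = _ := by
              simp only [List.reverse_append, List.reverse_cons, List.append_assoc]
    have hU : (rest.dropWhile PySem.Chars.isdigit).reverse = []
        ∨ ∃ U' e, PySem.Chars.isdigit e = false
            ∧ (rest.dropWhile PySem.Chars.isdigit).reverse = U' ++ [e] := by
      cases hu : rest.dropWhile PySem.Chars.isdigit with
      | nil => left; simp
      | cons e u'' =>
        right
        exact ⟨u''.reverse, e, pvHead_dropWhile_false rest e u'' hu, by simp⟩
    have hD : ∀ x ∈ ((rest.takeWhile PySem.Chars.isdigit).reverse ++ [c]),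
        PySem.Chars.isdigit x = true := by
      intro x hx
      rcases List.mem_append.mp hx with hx | hx
      · exact List.mem_takeWhile_imp (by simpa using hx)
      · simp at hx; subst hx; exact hcdig
    have hV : ∀ x ∈ (s.toList.reverse.takeWhile (fun c => !PySem.Chars.isdigit c)).reverse,
        PySem.Chars.isdigit x = false := by
      intro x hx
      have := List.mem_takeWhile_imp (l := s.toList.reverse)
        (p := fun c => !PySem.Chars.isdigit c) (by simpa using hx)
      simpa using this
    rw [pvAlt_closed s a _ _ _ hcs hU hD (by simp) hV]
    simp
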